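-- pv_equiv track=rewrite | github.com/alonShevach/introduction-to-CS | ex5/wordsearch.py | create_full_diagonal_matrix
-- ===== SOURCE A (Python) =====
-- def create_line_for_downwards(matrix):
--     """The function creates a list of the downwards line of the matrix."""
--     downwards_lines = []
--     temporary_list = []
--     for i in range(len(matrix[0])):
--         for line in matrix:
--             temporary_list.append(line[i])
--             if len(temporary_list) == len(matrix):
--                 downwards_lines.append(temporary_list)
--                 temporary_list = []
--     return downwards_lines
--
-- def create_full_diagonal_matrix(matrix):
--     """A function that creates a list of all the diagonal lines in the matrix
--     using the 'down right' direction (from top left to down right)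
--     we will use this function to create all kinds of diagonal lines."""
--     # Creating half of the diagonal line
--     half_diagonal_matrix = create_half_diagonal_matrix(matrix)
--     new_matrix = create_line_for_downwards(matrix)
--     # Turning the matrix upside down so the other half will be in the same place
--     complete_diagonal_matrix = create_half_diagonal_matrix(new_matrix)
--     for i in range(len(half_diagonal_matrix)):
--         if half_diagonal_matrix[i] in complete_diagonal_matrix:
--             # adding both list together, without the 1 line that is common
--             # to both of them
--             continue
--         complete_diagonal_matrix.append(half_diagonal_matrix[i])
--     return complete_diagonal_matrix
--
-- def create_half_diagonal_matrix(matrix):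
--     """This function creates a list of a part of diagonal lines
--     the part which is from the primary matrix diagonal and down
--     (not include the diagonals that are above the primary diagonal line.)"""
--     # I created a temporary list to bond every diagonal line at once,
--     # If i would not do it the list was with 1 object, i found it more efficient
--     diagonal_list = []
--     temporary_list = []
--     for i in range(len(matrix)):
--         # Not doing it on the first run, reset it for each line
--         if i > 0:
--             diagonal_list.append(temporary_list)
--             temporary_list = []
--         for index, line in enumerate(matrix[i:]):
--             # Not passing the indexes of the line
--             if index >= len(matrix[0]):
--                 continue
--             temporary_list.append(line[index])
--     diagonal_list.append(temporary_list)
--     return diagonal_list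
-- ===== SOURCE B (Python) =====
-- def create_full_diagonal_matrix(matrix):
--     """All down-right diagonals: walk each diagonal directly from its start
--     cell instead of building half-diagonal matrices and a transpose."""
--     rows = len(matrix)
--     width = len(matrix[0])
--
--     def diagonal(i, j):
--         line = []
--         while i < rows and j < width:
--             line.append(matrix[i][j])
--             i += 1
--             j += 1
--         return line
--
--     result = [diagonal(0, j) for j in range(width)]
--     for i in range(1, rows):
--         line = diagonal(i, 0)
--         if line not in result:
--             result.append(line)
--     return result
-- ===== Notes on version B (the rewrite author's own statement) =====
-- stated objective: simpler
-- what changed: B walks each down-right diagonal directly from its start cell (top row, then first column), instead of A's machinery of building the lower half-diagonal matrix, a column-transpose, the half-diagonals of the transpose, and merging; B keeps A's value-based skip of duplicate positive diagonals.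
-- outside the precondition, e.g. on create_full_diagonal_matrix([[]]): A returns [[]], B returns []; on create_full_diagonal_matrix([]): A raises IndexError, B raises IndexError
import Mathlib
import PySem

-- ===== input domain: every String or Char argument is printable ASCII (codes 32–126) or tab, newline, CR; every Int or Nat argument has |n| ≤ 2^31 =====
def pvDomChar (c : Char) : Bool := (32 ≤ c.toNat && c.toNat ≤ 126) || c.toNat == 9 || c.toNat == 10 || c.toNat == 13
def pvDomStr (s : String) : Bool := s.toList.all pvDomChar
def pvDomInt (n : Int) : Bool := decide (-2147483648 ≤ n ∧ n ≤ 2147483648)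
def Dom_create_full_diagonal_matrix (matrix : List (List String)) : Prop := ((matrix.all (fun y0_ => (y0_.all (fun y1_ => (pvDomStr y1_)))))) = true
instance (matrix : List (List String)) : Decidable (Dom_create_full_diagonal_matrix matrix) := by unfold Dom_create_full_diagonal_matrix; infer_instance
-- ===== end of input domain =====

-- B walks each down-right diagonal directly from its start cell instead of A's
-- half-diagonal/transpose/half-diagonal construction; simpler, same results on Pre_.


-- ===== PORT A =====
-- inner loop body of create_line_for_downwards: temp.append(line[i]); flush when len(temp)==len(matrix)
def pvColStep (matrix : List (List String)) (i : Nat)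
    (st : List (List String) × List String) (line : List String) :
    List (List String) × List String :=
  let temp := st.2 ++ [PySem.List.pyGetD line (i : Int) ""]
  if temp.length = matrix.length then (st.1 ++ [temp], []) else (st.1, temp)

-- for i in range(len(matrix[0])): for line in matrix: ...
def create_line_for_downwards (matrix : List (List String)) : List (List String) :=
  ((List.range (matrix.headD []).length).foldl
    (fun st i => matrix.foldl (pvColStep matrix i) st) ([], [])).1

-- outer loop body of create_half_diagonal_matrix: flush temp when i>0, then
-- for index, line in enumerate(matrix[i:]): skip index >= len(matrix[0]) else temp.append(line[index])
def pvHalfStep (matrix : List (List String))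
    (st : List (List String) × List String) (i : Nat) :
    List (List String) × List String :=
  let st := if 0 < i then (st.1 ++ [st.2], ([] : List String)) else st
  (matrix.drop i).zipIdx.foldl (fun (st : List (List String) × List String) p =>
    if (matrix.headD []).length ≤ p.2 then st
    else (st.1, st.2 ++ [PySem.List.pyGetD p.1 (p.2 : Int) ""])) st

def create_half_diagonal_matrix (matrix : List (List String)) : List (List String) :=
  let st := (List.range matrix.length).foldl (pvHalfStep matrix) ([], [])
  st.1 ++ [st.2]

def create_full_diagonal_matrix (matrix : List (List String)) : List (List String) :=
  let half := create_half_diagonal_matrix matrix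
  let new_matrix := create_line_for_downwards matrix
  let complete := create_half_diagonal_matrix new_matrix
  (List.range half.length).foldl (fun acc (i : Nat) =>
    let h := PySem.List.pyGetD half (i : Int) []
    if h ∈ acc then acc else acc ++ [h]) complete

-- ===== PORT B =====
-- while i < rows and j < width: line.append(matrix[i][j]); i += 1; j += 1
def pvDiagonal (matrix : List (List String)) (rows width : Nat) (i j : Nat) : List String :=
  if i < rows ∧ j < width then
    PySem.List.pyGetD (PySem.List.pyGetD matrix (i : Int) []) (j : Int) ""
      :: pvDiagonal matrix rows width (i + 1) (j + 1)
  else []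
termination_by rows - i

def create_full_diagonal_matrix_alt (matrix : List (List String)) : List (List String) :=
  let rows := matrix.length
  let width := (matrix.headD []).length
  let result := (List.range width).map (fun j => pvDiagonal matrix rows width 0 j)
  (List.range' 1 (rows - 1)).foldl (fun res i =>
    let line := pvDiagonal matrix rows width i 0
    if line ∈ res then res else res ++ [line]) result

-- ===== PRECONDITION & SPEC =====
-- Pre_ excludes: the empty matrix and matrices with a row shorter than row 0, on which A
-- (and B) raise IndexError; and the single-row zero-width matrix [[]], a degenerate corner
-- where A's value [[]] is an artefact of its trailing 'diagonal_list.append(temporary_list)'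
-- (B returns [] there). Zero-width matrices with two or more rows stay inside Pre_.
def Pre_create_full_diagonal_matrix (matrix : List (List String)) : Prop :=
  matrix ≠ [] ∧ (∀ row ∈ matrix, (matrix.headD []).length ≤ row.length) ∧
    (0 < (matrix.headD []).length ∨ 2 ≤ matrix.length)
instance (matrix : List (List String)) : Decidable (Pre_create_full_diagonal_matrix matrix) := by
  unfold Pre_create_full_diagonal_matrix; infer_instance

def pvWitness_create_full_diagonal_matrix : List (List String) := [["a", "b"], ["c", "d"]]

def Spec_create_full_diagonal_matrix (matrix : List (List String)) (out : List (List String)) : Prop := out = create_full_diagonal_matrix_alt matrix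
instance (matrix : List (List String)) (out : List (List String)) : Decidable (Spec_create_full_diagonal_matrix matrix out) := by unfold Spec_create_full_diagonal_matrix; infer_instance

-- ===== CLAIM (what is proved, stated in full; the proofs are below) =====
def Claim_equal_create_full_diagonal_matrix : Prop := ∀ (matrix : List (List String)), Dom_create_full_diagonal_matrix matrix → Pre_create_full_diagonal_matrix matrix → Spec_create_full_diagonal_matrix matrix (create_full_diagonal_matrix matrix)

-- ===== LEMMAS AND PROOFS =====

def pvCell (matrix : List (List String)) (i j : Nat) : String :=
  (matrix.getD i []).getD j ""

def pvDSpec (matrix : List (List String)) (rows width i j : Nat) : List String :=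
  (List.range (min (rows - i) (width - j))).map (fun k => pvCell matrix (i + k) (j + k))

theorem pvDiagonal_eq (matrix : List (List String)) (rows width : Nat) :
    ∀ i j, pvDiagonal matrix rows width i j = pvDSpec matrix rows width i j := by
  have key : ∀ n i j, rows - i ≤ n → pvDiagonal matrix rows width i j = pvDSpec matrix rows width i j := by
    intro n
    induction n with
    | zero =>
      intro i j h
      rw [pvDiagonal]
      have : ¬ (i < rows ∧ j < width) := by omega
      simp [this, pvDSpec, show rows - i = 0 by omega]
    | succ n ih =>
      intro i j h
      rw [pvDiagonal]
      by_cases hc : i < rows ∧ j < width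
      · simp only [hc]
        rw [ih (i+1) (j+1) (by omega)]
        have h1 : min (rows - i) (width - j) = min (rows - (i+1)) (width - (j+1)) + 1 := by omega
        simp [pvDSpec, h1, List.range_succ_eq_map, pvCell, List.map_map, Function.comp]
        intro a _ _
        rw [show i+1+a = i+(a+1) by omega, show j+1+a = j+(a+1) by omega]
      · simp [hc, pvDSpec, show min (rows - i) (width - j) = 0 by omega]
  intro i j; exact key (rows - i) i j le_rfl

theorem inner_zip (cols : Nat) : ∀ (ys : List (List String)) (s : Nat)
    (acc : List (List String)) (temp : List String),
    (ys.zipIdx s).foldl (fun (st : List (List String) × List String) p =>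
        if cols ≤ p.2 then st
        else (st.1, st.2 ++ [PySem.List.pyGetD p.1 (p.2 : Int) ""])) (acc, temp)
      = (acc, temp ++ (List.range (min ys.length (cols - s))).map
          (fun k => (ys.getD k []).getD (s + k) "")) := by
  intro ys
  induction ys with
  | nil => intro s acc temp; simp
  | cons y ys ih =>
    intro s acc temp
    simp only [List.zipIdx_cons, List.foldl_cons]
    by_cases hs : cols ≤ s
    · rw [if_pos hs, ih (s+1)]
      simp [show cols - s = 0 by omega, show cols - (s+1) = 0 by omega]
    · rw [if_neg hs, ih (s+1)]
      have h1 : min (ys.length + 1) (cols - s) = min ys.length (cols - (s+1)) + 1 := by omega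
      simp [h1, List.range_succ_eq_map, List.map_map, Function.comp, List.append_assoc]
      intro a _ _
      rw [show s + 1 + a = s + (a + 1) by omega]

theorem pvHalfStep_char (m : List (List String)) (st : List (List String) × List String) (i : Nat) :
    pvHalfStep m st i =
      if 0 < i then (st.1 ++ [st.2], pvDSpec m m.length (m.headD []).length i 0)
      else (st.1, st.2 ++ pvDSpec m m.length (m.headD []).length i 0) := by
  unfold pvHalfStep
  have key : ∀ (st' : List (List String) × List String),
      (m.drop i).zipIdx.foldl (fun (st : List (List String) × List String) p =>
        if (m.headD []).length ≤ p.2 then st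
        else (st.1, st.2 ++ [PySem.List.pyGetD p.1 (p.2 : Int) ""])) st'
      = (st'.1, st'.2 ++ pvDSpec m m.length (m.headD []).length i 0) := by
    intro st'
    rw [show st' = (st'.1, st'.2) from rfl, inner_zip]
    congr 1
    unfold pvDSpec pvCell
    simp [List.getD, List.getElem?_drop]
  split_ifs with h
  · rw [key (st.1 ++ [st.2], [])]; simp
  · exact key st

theorem pvRangeSplit (f : Nat → List String) (n : Nat) (hn : 1 ≤ n) :
    (List.range n).map f = (List.range (n-1)).map f ++ [f (n-1)] := by
  conv_lhs => rw [show n = (n-1)+1 by omega, List.range_succ]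
  simp

theorem half_fold (m : List (List String)) :
    ∀ n, 1 ≤ n → (List.range n).foldl (pvHalfStep m) ([], [])
      = ((List.range (n-1)).map (fun i => pvDSpec m m.length (m.headD []).length i 0),
         pvDSpec m m.length (m.headD []).length (n-1) 0) := by
  intro n
  induction n with
  | zero => omega
  | succ n ih =>
    intro _
    by_cases hn : 1 ≤ n
    · rw [List.range_succ, List.foldl_append, ih hn]
      simp only [List.foldl_cons, List.foldl_nil, pvHalfStep_char]
      rw [if_pos (show 0 < n by omega)]
      simp only [show n + 1 - 1 = n by omega]
      rw [pvRangeSplit _ n hn]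
    · have : n = 0 := by omega
      subst this
      simp [pvHalfStep_char]

theorem half_char (m : List (List String)) (hm : m ≠ []) :
    create_half_diagonal_matrix m =
      (List.range m.length).map (fun i => pvDSpec m m.length (m.headD []).length i 0) := by
  have hR : 1 ≤ m.length := by cases m <;> simp_all
  unfold create_half_diagonal_matrix
  rw [half_fold m m.length hR, pvRangeSplit _ m.length hR]

theorem col_fold (m : List (List String)) (i : Nat) :
    ∀ (ys : List (List String)) (acc : List (List String)) (temp : List String),
      temp.length + ys.length = m.length → ys ≠ [] →
      ys.foldl (pvColStep m i) (acc, temp)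
        = (acc ++ [temp ++ ys.map (fun line => line.getD i "")], ([] : List String)) := by
  intro ys
  induction ys with
  | nil => simp
  | cons y ys ih =>
    intro acc temp hlen _
    simp only [List.foldl_cons]
    simp only [List.length_cons] at hlen
    rcases List.eq_nil_or_concat' ys with h | _
    · subst h
      unfold pvColStep
      simp only [List.length_nil] at hlen
      rw [if_pos (by simp only [List.length_append, List.length_cons, List.length_nil]; omega)]
      simp
    · have hne : ys ≠ [] := by rintro rfl; simp_all
      have hy : 0 < ys.length := List.length_pos_iff.mpr hne
      have : pvColStep m i (acc, temp) y = (acc, temp ++ [PySem.List.pyGetD y (i:Int) ""]) := by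
        unfold pvColStep
        rw [if_neg (by simp only [List.length_append, List.length_cons, List.length_nil]; omega)]
      rw [this, ih acc _ (by simp only [List.length_append, List.length_cons, List.length_nil]; omega) hne]
      simp

theorem downwards_char (m : List (List String)) (hm : m ≠ []) :
    create_line_for_downwards m =
      (List.range (m.headD []).length).map (fun j => m.map (fun line => line.getD j "")) := by
  unfold create_line_for_downwards
  have key : ∀ n, (List.range n).foldl (fun st i => m.foldl (pvColStep m i) st) ([], [])
      = ((List.range n).map (fun j => m.map (fun line => line.getD j "")), ([] : List String)) := by
    intro n
    induction n with
    | zero => simp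
    | succ n ih =>
      rw [List.range_succ, List.foldl_append, ih]
      simp only [List.foldl_cons, List.foldl_nil]
      rw [col_fold m n m _ [] (by simp) hm]
      simp
  rw [key]

theorem range_split_head (n : Nat) (h : 0 < n) :
    List.range n = 0 :: List.range' 1 (n-1) := by
  rw [List.range_eq_range', show n = (n-1)+1 by omega, List.range'_succ]
  norm_num

theorem transp_diag (matrix : List (List String)) (C d : Nat) :
    pvDSpec ((List.range C).map (fun j => matrix.map (fun line => line.getD j "")))
      C matrix.length d 0
      = pvDSpec matrix matrix.length C 0 d := by
  unfold pvDSpec pvCell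
  rw [Nat.min_comm]
  apply List.map_congr_left
  intro k hk
  simp only [List.mem_range] at hk
  rw [PySem.List.getD_map_range _ _ _ _ (by omega)]
  simp only [Nat.zero_add, List.getD_eq_getElem?_getD, List.getElem?_map]
  cases h : matrix[k]? <;> simp

theorem main_spec (matrix : List (List String))
    (hm : matrix ≠ []) (hC : 0 < (matrix.headD []).length) :
    create_full_diagonal_matrix matrix = create_full_diagonal_matrix_alt matrix := by
  have hR : 0 < matrix.length := List.length_pos_iff.mpr hm
  simp only [create_full_diagonal_matrix, create_full_diagonal_matrix_alt]
  rw [downwards_char matrix hm]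
  set C := (matrix.headD []).length with hCdef
  set new := (List.range C).map (fun j => matrix.map (fun line => line.getD j "")) with hnew
  have hnewlen : new.length = C := by simp [hnew]
  have hnewne : new ≠ [] := by
    rw [hnew, range_split_head C hC]; simp
  have hnewhead : (new.headD []).length = matrix.length := by
    rw [hnew, range_split_head C hC]; simp
  rw [half_char matrix hm, half_char new hnewne, hnewlen, hnewhead]
  have hcomplete : (List.range C).map (fun i => pvDSpec new C matrix.length i 0)
      = (List.range C).map (fun j => pvDiagonal matrix matrix.length C 0 j) := by
    apply List.map_congr_left
    intro d _
    rw [pvDiagonal_eq, hnew]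
    exact transp_diag matrix C d
  rw [hcomplete]
  set hl := (List.range matrix.length).map (fun i => pvDSpec matrix matrix.length C i 0) with hhl
  have hlen : hl.length = matrix.length := by rw [hhl]; simp
  rw [hlen, range_split_head matrix.length hR, List.foldl_cons]
  have h0 : PySem.List.pyGetD hl (((0:Nat)) : Int) [] = pvDiagonal matrix matrix.length C 0 0 := by
    rw [hhl, PySem.List.pyGetD_natCast, PySem.List.getD_map_range _ _ _ _ hR, pvDiagonal_eq]
  rw [h0]
  have hmem : pvDiagonal matrix matrix.length C 0 0
      ∈ (List.range C).map (fun j => pvDiagonal matrix matrix.length C 0 j) :=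
    List.mem_map.mpr ⟨0, List.mem_range.mpr hC, rfl⟩
  rw [if_pos hmem]
  apply PySem.List.foldl_congr_mem
  intro acc i hi
  have hiR : i < matrix.length := by
    have := List.mem_range'_1.mp hi; omega
  rw [hhl, PySem.List.pyGetD_natCast, PySem.List.getD_map_range _ _ _ _ hiR, pvDiagonal_eq]

theorem pvFoldStay {α : Type} (g : α → List String) :
    ∀ (l : List α), (∀ i ∈ l, g i = []) →
    ∀ (acc : List (List String)), [] ∈ acc →
      l.foldl (fun acc i => if g i ∈ acc then acc else acc ++ [g i]) acc = acc := by
  intro l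
  induction l with
  | nil => intro _ acc _; rfl
  | cons x l ih =>
    intro hg acc hacc
    simp only [List.foldl_cons]
    rw [hg x (by simp), if_pos hacc]
    exact ih (fun i hi => hg i (by simp [hi])) acc hacc

theorem zero_width_spec (matrix : List (List String)) (hm : matrix ≠ [])
    (hC : (matrix.headD []).length = 0) (hR2 : 2 ≤ matrix.length) :
    create_full_diagonal_matrix matrix = create_full_diagonal_matrix_alt matrix := by
  simp only [create_full_diagonal_matrix, create_full_diagonal_matrix_alt]
  rw [half_char matrix hm, downwards_char matrix hm, hC]
  simp only [List.range_zero, List.map_nil]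
  have hcompl : create_half_diagonal_matrix [] = [[]] := rfl
  rw [hcompl, List.length_map, List.length_range]
  have hd : ∀ i, pvDSpec matrix matrix.length 0 i 0 = [] := by
    intro i; unfold pvDSpec; simp
  rw [pvFoldStay (fun (i : Nat) => PySem.List.pyGetD
      ((List.range matrix.length).map (fun i => pvDSpec matrix matrix.length 0 i 0)) (↑i) [])
      (List.range matrix.length)
      (by intro i hi
          simp only [PySem.List.pyGetD_natCast]
          rw [PySem.List.getD_map_range _ _ _ _ (List.mem_range.mp hi), hd])
      [[]] (by simp)]
  have hw : ∀ i, pvDiagonal matrix matrix.length 0 i 0 = [] := by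
    intro i; rw [pvDiagonal_eq, hd]
  rw [show matrix.length - 1 = (matrix.length - 2) + 1 by omega, List.range'_succ,
    List.foldl_cons, hw 1]
  rw [if_neg (by simp), List.nil_append]
  rw [pvFoldStay (fun i => pvDiagonal matrix matrix.length 0 i 0) _
      (fun i _ => hw i) [[]] (by simp)]

-- ===== VERDICT (by name: the statement is the Claim_ definition above) =====
theorem create_full_diagonal_matrix_spec : Claim_equal_create_full_diagonal_matrix := by
  intro matrix _ hpre
  obtain ⟨hm, -, hdisj⟩ := hpre
  unfold Spec_create_full_diagonal_matrix
  by_cases hC : 0 < (matrix.headD []).length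
  · exact main_spec matrix hm hC
  · rcases hdisj with h | h
    · omega
    · exact zero_width_spec matrix hm (by omega) h
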